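-- pv_equiv track=rewrite | github.com/dimbyd/latextree | latextree/parser/misc.py | parse_kv_opt_args
-- ===== SOURCE A (Python) =====
-- def parse_kv_opt_args(text):
--     '''
--     Parse contents of simple optional argument
--     A mixture of atomic and key-value pairs is permitted
--     e.g. '[arg1, arg2, key1=val1, key2=val2]'
--     '''
--     if text[0]=='[' and text[-1]==']':
--         text = text[1:-1]
--     items =  text.split(',')
--     args = [item.strip() for item in items if '=' not in item]
--     pairs = [item.split('=') for item in items if '=' in item]
--     pairs = [(x.strip(), y.strip())for x,y in pairs]
--     kwargs = dict(pairs)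
--     return (args, kwargs)
-- ===== SOURCE B (Python) =====
-- def parse_kv_opt_args(text):
--     '''Character-level scanner: one pass over the characters, no split calls;
--     key/value buffers and a seen-equals flag replace the comprehensions.'''
--     if text[0] == '[' and text[-1] == ']':
--         text = text[1:-1]
--     args = []
--     kwargs = {}
--     key, val, seen_eq = '', '', False
--     for ch in text + ',':
--         if ch == ',':
--             if seen_eq:
--                 kwargs[key.strip()] = val.strip()
--             else:
--                 args.append(key.strip())
--             key, val, seen_eq = '', '', False
--         elif ch == '=' and not seen_eq:
--             seen_eq = True
--         elif seen_eq:
--             val += ch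
--         else:
--             key += ch
--     return (args, kwargs)
-- ===== Notes on version B (the rewrite author's own statement) =====
-- stated objective: alternative
-- what changed: Replaces A's comma-split and equals-split plus three filter/map comprehensions and a dict() conversion with a single character-level scanner that maintains key/value buffers and a seen-equals flag, committing an arg or a kwarg at each comma; no split call at all.
import Mathlib
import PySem

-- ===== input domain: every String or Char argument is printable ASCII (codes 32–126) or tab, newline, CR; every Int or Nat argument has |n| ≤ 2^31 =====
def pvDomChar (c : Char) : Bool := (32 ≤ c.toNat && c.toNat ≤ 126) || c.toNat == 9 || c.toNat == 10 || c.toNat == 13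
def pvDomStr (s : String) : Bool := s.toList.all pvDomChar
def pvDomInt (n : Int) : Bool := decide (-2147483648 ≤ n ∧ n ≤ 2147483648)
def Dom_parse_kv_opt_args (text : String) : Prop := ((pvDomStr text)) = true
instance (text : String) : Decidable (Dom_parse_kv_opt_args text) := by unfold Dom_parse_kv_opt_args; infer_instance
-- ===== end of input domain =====

-- B replaces A's split-based comprehensions with a one-pass character-level scanner (different algorithm, same cost).
-- Equivalence is about the RETURN value; neither version mutates its argument.

-- shared transliteration of the bracket-stripping guard (the identical first lines of Source A and Source B)
def pvStrip (text : String) : String :=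
  if PySem.Str.pyGet? text 0 = some '[' ∧ PySem.Str.pyGet? text (-1) = some ']' then
    PySem.Str.slice text (some 1) (some (-1))
  else text

-- ===== PORT A =====
def parse_kv_opt_args (text : String) : List String × (List (String × String)) :=
  let text := pvStrip text
  let items := (PySem.Str.split? text ",").getD []   -- sep "," ≠ "", so split? is always `some`
  let args := (items.filter (fun item => ¬ PySem.Str.isIn "=" item)).map PySem.Str.strip
  let pairs := (items.filter (fun item => PySem.Str.isIn "=" item)).map
    (fun item => (PySem.Str.split? item "=").getD [])
  -- 'x, y = parts' : under Pre_ each parts has exactly two elements, so getD 0 / getD 1 are exact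
  let pairs2 := pairs.map (fun p => (PySem.Str.strip (p.getD 0 ""), PySem.Str.strip (p.getD 1 "")))
  (args, (PySem.Dict.ofList pairs2).items)

-- ===== PORT B =====
-- Source B's loop body for one character ch; state (args, kwargs, key buffer, val buffer, seen_eq)
def pvStep (st : List String × PySem.Dict String String × List Char × List Char × Bool)
    (ch : Char) : List String × PySem.Dict String String × List Char × List Char × Bool :=
  let (args, kwargs, key, val, seen) := st
  if ch = ',' then
    if seen then
      (args, kwargs.insert (String.ofList (PySem.Chars.strip key)) (String.ofList (PySem.Chars.strip val)), [], [], false)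
    else
      (args ++ [String.ofList (PySem.Chars.strip key)], kwargs, [], [], false)
  else if ch = '=' ∧ seen = false then
    (args, kwargs, key, val, true)
  else if seen then
    (args, kwargs, key, val ++ [ch], true)
  else
    (args, kwargs, key ++ [ch], val, false)

def parse_kv_opt_args_alt (text : String) : List String × (List (String × String)) :=
  let text := pvStrip text
  let st := (text.toList ++ [',']).foldl pvStep ([], PySem.Dict.empty, [], [], false)
  (st.1, st.2.1.items)

-- ===== PRECONDITION & SPEC =====
-- the comma-separated items of the bracket-stripped text (used by Pre_ to name them)
def pvItems (text : String) : List String := (PySem.Str.split? (pvStrip text) ",").getD []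

-- Pre_ excludes exactly the inputs where Python A raises: the empty string (IndexError when indexing it)
-- and comma-items containing more than one equals sign (ValueError on the 2-tuple unpacking).
def Pre_parse_kv_opt_args (text : String) : Prop :=
  text ≠ "" ∧ ∀ item ∈ pvItems text, (item.toList.count '=') ≤ 1
instance (text : String) : Decidable (Pre_parse_kv_opt_args text) := by
  unfold Pre_parse_kv_opt_args; infer_instance
def pvWitness_parse_kv_opt_args : String := "[a, b, k=v]"

def Spec_parse_kv_opt_args (text : String) (out : List String × (List (String × String))) : Prop := out = parse_kv_opt_args_alt text
instance (text : String) (out : List String × (List (String × String))) : Decidable (Spec_parse_kv_opt_args text out) := by unfold Spec_parse_kv_opt_args; infer_instance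

-- ===== CLAIM (what is proved, stated in full; the proofs are below) =====
def Claim_equal_parse_kv_opt_args : Prop := ∀ (text : String), Dom_parse_kv_opt_args text → Pre_parse_kv_opt_args text → Spec_parse_kv_opt_args text (parse_kv_opt_args text)

-- ===== LEMMAS AND PROOFS =====

def pvSplitCh (sep : Char) : List Char → List (List Char)
  | [] => [[]]
  | c :: rest => if c = sep then [] :: pvSplitCh sep rest
                 else (pvSplitCh sep rest).modifyHead (c :: ·)
theorem pvSplitCh_ne_nil (sep : Char) (cs : List Char) : pvSplitCh sep cs ≠ [] := by
  cases cs with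
  | nil => simp [pvSplitCh]
  | cons c rest =>
    simp only [pvSplitCh]
    split
    · simp
    · exact fun h => (pvSplitCh_ne_nil sep rest) (List.modifyHead_eq_nil_iff.mp h)

theorem pvSplitOn_go (sep : Char) (l : List Char) (fuel : Nat) (h : l.length ≤ fuel)
    (cur : List Char) (acc : List (List Char)) :
    PySem.Chars.splitOn.go [sep] fuel l cur acc
      = acc.reverse ++ (pvSplitCh sep l).modifyHead (cur.reverse ++ ·) := by
  induction l generalizing fuel cur acc with
  | nil =>
    cases fuel with
    | zero => simp [PySem.Chars.splitOn.go, pvSplitCh]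
    | succ f => simp [PySem.Chars.splitOn.go, pvSplitCh]
  | cons c rest ih =>
    cases fuel with
    | zero => simp at h
    | succ f =>
      simp only [PySem.Chars.splitOn.go]
      by_cases hc : c = sep
      · subst hc
        rw [if_pos (by simp [List.isPrefixOf])]
        simp only [List.length_cons, List.length_nil, List.drop_succ_cons, List.drop_zero]
        rw [ih f (by simpa using h) [] ((cur.reverse) :: acc)]
        simp [pvSplitCh, List.modifyHead]
        cases pvSplitCh c rest <;> rfl
      · rw [if_neg (by simp [List.isPrefixOf]; exact fun hh => hc hh.symm)]
        rw [ih f (by simpa using h) (c :: cur) acc]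
        obtain ⟨hhd, tl, hsp⟩ : ∃ hd tl, pvSplitCh sep rest = hd :: tl := by
          cases hsp : pvSplitCh sep rest with
          | nil => exact absurd hsp (pvSplitCh_ne_nil sep rest)
          | cons a b => exact ⟨a, b, rfl⟩
        simp [pvSplitCh, hc, hsp, List.modifyHead]

theorem pvSplitOn_eq (sep : Char) (cs : List Char) :
    PySem.Chars.splitOn cs [sep] = pvSplitCh sep cs := by
  unfold PySem.Chars.splitOn
  rw [pvSplitOn_go sep cs (cs.length + 1) (by omega) [] []]
  obtain ⟨hd, tl, hsp⟩ : ∃ hd tl, pvSplitCh sep cs = hd :: tl := by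
    cases hsp : pvSplitCh sep cs with
    | nil => exact absurd hsp (pvSplitCh_ne_nil sep cs)
    | cons a b => exact ⟨a, b, rfl⟩
  simp [hsp]

theorem pvSplitCh_no_sep (sep : Char) (cs : List Char) (h : sep ∉ cs) :
    pvSplitCh sep cs = [cs] := by
  induction cs with
  | nil => rfl
  | cons c rest ih =>
    simp only [List.mem_cons, not_or] at h
    have hcs : ¬ c = sep := fun hh => h.1 hh.symm
    simp [pvSplitCh, hcs, ih h.2]

theorem pvSplitCh_once (sep : Char) (k v : List Char) (hk : sep ∉ k) (hv : sep ∉ v) :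
    pvSplitCh sep (k ++ sep :: v) = [k, v] := by
  induction k with
  | nil => simp [pvSplitCh, pvSplitCh_no_sep sep v hv]
  | cons c rest ih =>
    simp only [List.mem_cons, not_or] at hk
    have hcs : ¬ c = sep := fun hh => hk.1 hh.symm
    simp [pvSplitCh, hcs, ih hk.2]

theorem pvSplitCh_mem (cs it : List Char) (h : it ∈ pvSplitCh ',' cs) : ',' ∉ it := by
  induction cs generalizing it with
  | nil =>
    simp only [pvSplitCh, List.mem_singleton] at h
    simp [h]
  | cons c rest ih =>
    by_cases hc : c = ','
    · subst hc
      simp only [pvSplitCh] at h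
      rcases List.mem_cons.mp h with h1 | h1
      · simp [h1]
      · exact ih it h1
    · simp only [pvSplitCh, if_neg hc] at h
      obtain ⟨hd, tl, hsp⟩ : ∃ hd tl, pvSplitCh ',' rest = hd :: tl := by
        cases hsp : pvSplitCh ',' rest with
        | nil => exact absurd hsp (pvSplitCh_ne_nil ',' rest)
        | cons a b => exact ⟨a, b, rfl⟩
      rw [hsp] at h
      simp only [List.modifyHead] at h
      rcases List.mem_cons.mp h with h1 | h1
      · subst h1
        have h1 : ',' ∉ hd := ih hd (by simp [hsp])
        have hcs : ¬ (',' = c) := fun hh => hc hh.symm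
        simp [h1, hcs]
      · exact ih it (by simp [hsp, h1])

theorem pvFlatMap_splitCh (cs : List Char) :
    (pvSplitCh ',' cs).flatMap (· ++ [',']) = cs ++ [','] := by
  induction cs with
  | nil => rfl
  | cons c rest ih =>
    by_cases hc : c = ','
    · subst hc; simp [pvSplitCh, ih]
    · obtain ⟨hd, tl, hsp⟩ : ∃ hd tl, pvSplitCh ',' rest = hd :: tl := by
        cases hsp : pvSplitCh ',' rest with
        | nil => exact absurd hsp (pvSplitCh_ne_nil ',' rest)
        | cons a b => exact ⟨a, b, rfl⟩
      rw [hsp] at ih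
      simp only [pvSplitCh, if_neg hc, hsp, List.modifyHead]
      simp only [List.flatMap_cons] at ih ⊢
      simp [List.cons_append, ih]

theorem pvScan_seen (cs : List Char) (h : ',' ∉ cs) (args : List String)
    (d : PySem.Dict String String) (key val : List Char) :
    cs.foldl pvStep (args, d, key, val, true) = (args, d, key, val ++ cs, true) := by
  induction cs generalizing val with
  | nil => simp
  | cons c rest ih =>
    simp only [List.mem_cons, not_or] at h
    have hc : ¬ c = ',' := fun hh => h.1 hh.symm
    rw [List.foldl_cons]
    have hstep : pvStep (args, d, key, val, true) c = (args, d, key, val ++ [c], true) := by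
      simp [pvStep, hc]
    rw [hstep, ih h.2]
    simp

theorem pvScan_item (cs : List Char) (h : ',' ∉ cs) (args : List String)
    (d : PySem.Dict String String) (key : List Char) :
    cs.foldl pvStep (args, d, key, [], false) =
      if '=' ∈ cs then
        (args, d, key ++ cs.takeWhile (· ≠ '='), (cs.dropWhile (· ≠ '=')).tail, true)
      else (args, d, key ++ cs, [], false) := by
  induction cs generalizing key with
  | nil => simp
  | cons c rest ih =>
    simp only [List.mem_cons, not_or] at h
    have hc : ¬ c = ',' := fun hh => h.1 hh.symm
    rw [List.foldl_cons]
    by_cases he : c = '='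
    · subst he
      have hstep : pvStep (args, d, key, [], false) '=' = (args, d, key, [], true) := by
        simp [pvStep]
      rw [hstep, pvScan_seen rest h.2]
      simp [List.takeWhile, List.dropWhile]
    · have hstep : pvStep (args, d, key, [], false) c = (args, d, key ++ [c], [], false) := by
        simp [pvStep, hc, he]
      rw [hstep, ih h.2]
      have he' : ¬ (c = '=') := he
      by_cases hm : '=' ∈ rest
      · simp [hm, he']
      · have hne : ¬ ('=' = c) := fun hh => he hh.symm
        simp [hm, hne]

def pvCommit (st : List String × PySem.Dict String String) (cs : List Char) :
    List String × PySem.Dict String String :=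
  if '=' ∈ cs then
    (st.1, st.2.insert (String.ofList (PySem.Chars.strip (cs.takeWhile (· ≠ '='))))
                       (String.ofList (PySem.Chars.strip ((cs.dropWhile (· ≠ '=')).tail))))
  else (st.1 ++ [String.ofList (PySem.Chars.strip cs)], st.2)

theorem pvScan_commit (cs rest : List Char) (h : ',' ∉ cs) (args : List String)
    (d : PySem.Dict String String) :
    (cs ++ ',' :: rest).foldl pvStep (args, d, [], [], false) =
      rest.foldl pvStep ((pvCommit (args, d) cs).1, (pvCommit (args, d) cs).2, [], [], false) := by
  rw [List.foldl_append, pvScan_item cs h args d []]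
  by_cases hm : '=' ∈ cs
  · simp only [if_pos hm, List.foldl_cons, List.nil_append]
    have : pvStep (args, d, cs.takeWhile (· ≠ '='), (cs.dropWhile (· ≠ '=')).tail, true) ',' =
        (args, d.insert (String.ofList (PySem.Chars.strip (cs.takeWhile (· ≠ '='))))
          (String.ofList (PySem.Chars.strip ((cs.dropWhile (· ≠ '=')).tail))), [], [], false) := by
      simp [pvStep]
    rw [this]
    simp [pvCommit, hm]
  · simp only [if_neg hm, List.foldl_cons, List.nil_append]
    have : pvStep (args, d, cs, [], false) ',' =
        (args ++ [String.ofList (PySem.Chars.strip cs)], d, [], [], false) := by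
      simp [pvStep]
    rw [this]
    simp [pvCommit, hm]

theorem pvScan_items (items : List (List Char)) (h : ∀ it ∈ items, ',' ∉ it)
    (args : List String) (d : PySem.Dict String String) :
    (items.flatMap (· ++ [','])).foldl pvStep (args, d, [], [], false) =
      ((items.foldl pvCommit (args, d)).1, (items.foldl pvCommit (args, d)).2, [], [], false) := by
  induction items generalizing args d with
  | nil => simp
  | cons it tl ih =>
    simp only [List.flatMap_cons, List.append_assoc, List.singleton_append, List.foldl_cons]
    rw [pvScan_commit it (tl.flatMap (· ++ [','])) (h it (by simp)) args d]
    exact ih (fun x hx => h x (by simp [hx])) _ _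

def pvCommitA (st : List String × PySem.Dict String String) (item : String) :
    List String × PySem.Dict String String :=
  if PySem.Str.isIn "=" item then
    let p := (PySem.Str.split? item "=").getD []
    (st.1, st.2.insert (PySem.Str.strip (p.getD 0 "")) (PySem.Str.strip (p.getD 1 "")))
  else (st.1 ++ [PySem.Str.strip item], st.2)

theorem pvIsIn_bridge (s : String) : PySem.Str.isIn "=" s = PySem.Chars.isIn ['='] s.toList := rfl

theorem pvStrip_bridge (k : List Char) :
    PySem.Str.strip (String.ofList k) = String.ofList (PySem.Chars.strip k) := by
  simp [PySem.Str.strip]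

theorem pvIsIn_ofList (it : List Char) :
    PySem.Str.isIn "=" (String.ofList it) = true ↔ '=' ∈ it := by
  rw [pvIsIn_bridge, String.toList_ofList]
  rw [PySem.Chars.isIn_iff_infix]
  exact List.singleton_infix_iff '=' it

theorem pvCommitA_fold (items : List String) (accA : List String) (d : PySem.Dict String String) :
    items.foldl pvCommitA (accA, d)
    = (accA ++ (items.filter (fun item => ¬ PySem.Str.isIn "=" item)).map PySem.Str.strip,
       d.update (((items.filter (fun item => PySem.Str.isIn "=" item)).map
          (fun item => (PySem.Str.split? item "=").getD [])).map
          (fun p => (PySem.Str.strip (p.getD 0 ""), PySem.Str.strip (p.getD 1 ""))))) := by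
  induction items generalizing accA d with
  | nil => simp [PySem.Dict.update]
  | cons it rest ih =>
    by_cases h : PySem.Str.isIn "=" it
    · rw [List.foldl_cons, List.filter_cons_of_neg (by simpa using h),
        List.filter_cons_of_pos h, List.map_cons, List.map_cons]
      rw [show ∀ (d : PySem.Dict String String) k v ps, d.update ((k, v) :: ps) = (d.insert k v).update ps
            from fun _ _ _ _ => rfl]
      rw [show pvCommitA (accA, d) it = (accA, d.insert (PySem.Str.strip ((((PySem.Str.split? it "=").getD []).getD 0 "")))
            (PySem.Str.strip ((((PySem.Str.split? it "=").getD []).getD 1 "")))) by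
          simp only [pvCommitA, if_pos h]]
      exact ih _ _
    · rw [List.foldl_cons, List.filter_cons_of_pos (by simpa using h),
        List.filter_cons_of_neg h, List.map_cons,
        show pvCommitA (accA, d) it = (accA ++ [PySem.Str.strip it], d) by
          simp only [pvCommitA, if_neg h]]
      rw [ih, List.append_assoc]
      rfl

theorem pvCommit_eq_commitA (it : List Char) (h : it.count '=' ≤ 1)
    (st : List String × PySem.Dict String String) :
    pvCommitA st (String.ofList it) = pvCommit st it := by
  by_cases hm : '=' ∈ it
  · have hdrop_ne : it.dropWhile (· ≠ '=') ≠ [] := by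
      intro hnil
      have hall := List.dropWhile_eq_nil_iff.mp hnil
      have := hall '=' hm
      simp at this
    have hhead : (it.dropWhile (· ≠ '=')).head hdrop_ne = '=' := by
      have := List.head_dropWhile_not (p := fun x => decide (x ≠ '=')) hdrop_ne
      simpa using this
    set k := it.takeWhile (· ≠ '=') with hkdef
    set v := (it.dropWhile (· ≠ '=')).tail with hvdef
    have h2 : '=' :: v = it.dropWhile (· ≠ '=') := by
      conv_lhs => rw [← hhead]
      exact List.cons_head_tail hdrop_ne
    have hdecomp : it = k ++ '=' :: v := by
      conv_lhs => rw [← List.takeWhile_append_dropWhile (p := fun x => decide (x ≠ '=')) (l := it)]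
      rw [← h2, hkdef]
    have hk : '=' ∉ k := by
      intro hkm
      have := List.mem_takeWhile_imp hkm
      simp at this
    have hv : '=' ∉ v := by
      intro hvm
      have : it.count '=' ≥ 2 := by
        rw [hdecomp, List.count_append, List.count_cons_self]
        have := List.count_pos_iff.mpr hvm
        omega
      omega
    have hsplit : PySem.Str.split? (String.ofList it) "=" = some [String.ofList k, String.ofList v] := by
      have : PySem.Chars.split? it ['='] = some [k, v] := by
        simp [PySem.Chars.split?, pvSplitOn_eq]
        conv_lhs => rw [hdecomp]
        exact pvSplitCh_once '=' k v hk hv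
      simp [PySem.Str.split?, String.toList_ofList, this]
    simp only [pvCommitA, pvCommit, if_pos ((pvIsIn_ofList it).mpr hm), if_pos hm, hsplit,
      Option.getD_some, List.getD_cons_zero, List.getD_cons_succ, pvStrip_bridge]
    rw [← hkdef, ← hvdef]
  · simp only [pvCommitA, pvCommit,
      if_neg (fun hh => hm ((pvIsIn_ofList it).mp hh)), if_neg hm]
    simp [pvStrip_bridge]

theorem pvMain (text : String) (hcnt : ∀ item ∈ pvItems text, (item.toList.count '=') ≤ 1) :
    parse_kv_opt_args text = parse_kv_opt_args_alt text := by
  have hitems : (PySem.Str.split? (pvStrip text) ",").getD []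
      = (pvSplitCh ',' (pvStrip text).toList).map String.ofList := by
    simp [PySem.Str.split?, PySem.Chars.split?, pvSplitOn_eq]
  have hcnt' : ∀ it ∈ pvSplitCh ',' (pvStrip text).toList, it.count '=' ≤ 1 := by
    intro it hit
    have := hcnt (String.ofList it) (by rw [pvItems, hitems]; exact List.mem_map_of_mem hit)
    simpa using this
  have hfoldeq : ((pvSplitCh ',' (pvStrip text).toList).map String.ofList).foldl pvCommitA
        ([], PySem.Dict.empty)
      = (pvSplitCh ',' (pvStrip text).toList).foldl pvCommit ([], PySem.Dict.empty) := by
    rw [List.foldl_map]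
    apply PySem.List.foldl_congr_mem
    intro acc x hx
    exact pvCommit_eq_commitA x (hcnt' x hx) acc
  have hB : parse_kv_opt_args_alt text =
      (((pvSplitCh ',' (pvStrip text).toList).foldl pvCommit ([], PySem.Dict.empty)).1,
       ((pvSplitCh ',' (pvStrip text).toList).foldl pvCommit ([], PySem.Dict.empty)).2.items) := by
    show ((((pvStrip text).toList ++ [',']).foldl pvStep ([], PySem.Dict.empty, [], [], false)).1,
          (((pvStrip text).toList ++ [',']).foldl pvStep ([], PySem.Dict.empty, [], [], false)).2.1.items) = _
    rw [show (pvStrip text).toList ++ [','] = (pvSplitCh ',' (pvStrip text).toList).flatMap (· ++ [','])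
          from (pvFlatMap_splitCh _).symm]
    rw [pvScan_items _ (fun it hit => pvSplitCh_mem _ it hit) [] PySem.Dict.empty]
  have hA : parse_kv_opt_args text =
      ((((pvSplitCh ',' (pvStrip text).toList).map String.ofList).foldl pvCommitA ([], PySem.Dict.empty)).1,
       (((pvSplitCh ',' (pvStrip text).toList).map String.ofList).foldl pvCommitA ([], PySem.Dict.empty)).2.items) := by
    show (((((PySem.Str.split? (pvStrip text) ",").getD []).filter (fun item => ¬ PySem.Str.isIn "=" item)).map PySem.Str.strip),
      (PySem.Dict.ofList (((((PySem.Str.split? (pvStrip text) ",").getD []).filter (fun item => PySem.Str.isIn "=" item)).map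
        (fun item => (PySem.Str.split? item "=").getD [])).map
        (fun p => (PySem.Str.strip (p.getD 0 ""), PySem.Str.strip (p.getD 1 ""))))).items) = _
    rw [hitems, pvCommitA_fold]
    simp only [List.nil_append]
    rfl
  rw [hA, hB, hfoldeq]

-- ===== VERDICT (by name: the statement is the Claim_ definition above) =====
theorem parse_kv_opt_args_spec : Claim_equal_parse_kv_opt_args := by
  intro text _ hpre
  show parse_kv_opt_args text = parse_kv_opt_args_alt text
  exact pvMain text hpre.2
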